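-- pv_equiv track=rewrite | github.com/mtakeshi1/djangosample | cardapio_parser.py | try_spread
-- ===== SOURCE A (Python) =====
-- from typing import List, Optional
--
-- meal_separators = ['arroz', 'sopa', 'espaguete', 'macarrão', 'canja', 'lasanha']
--
-- def starts_with_any(s: str, candidates: List[str]) -> bool:
--     for c in candidates:
--         if s.strip().lower().startswith(c):
--             return True
--     return False
--
-- def try_spread(entries: List[str]) -> List[str]:
--     acc = []
--     current = ''
--
--     for s in entries:
--         if starts_with_any(s, meal_separators):
--             if len(current) > 0:
--                 acc.append(current)
--             current = s + ' '
--         else: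
--             current += s + ' '
--
--     if len(current) > 0:
--         acc.append(current)
--
--     return acc
-- ===== SOURCE B (Python) =====
-- from typing import List
--
-- meal_separators = ['arroz', 'sopa', 'espaguete', 'macarrão', 'canja', 'lasanha']
--
-- def starts_with_any(s: str, candidates: List[str]) -> bool:
--     for c in candidates:
--         if s.strip().lower().startswith(c):
--             return True
--     return False
--
-- def split_at_seps(rest: List[str]) -> List[List[str]]:
--     # Recursively cut: the first group is rest[0] together with the run of
--     # non-separator entries after it; recurse from the next separator on.
--     if not rest:
--         return []
--     tail = rest[1:]
--     n = 0
--     while n < len(tail) and not starts_with_any(tail[n], meal_separators):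
--         n += 1
--     return [[rest[0]] + tail[:n]] + split_at_seps(tail[n:])
--
-- def try_spread(entries: List[str]) -> List[str]:
--     return [''.join(e + ' ' for e in seg) for seg in split_at_seps(entries)]
-- ===== Notes on version B (the rewrite author's own statement) =====
-- stated objective: alternative
-- what changed: B replaces A's single linear fold with a string accumulator and length tests by a recursion on groups: split_at_seps repeatedly slices off one segment (the head entry plus the following run of non-separator entries) and recurses at the next separator, then each segment is rendered with join; no accumulator or emptiness test on a growing string exists in B.
import Mathlib
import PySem

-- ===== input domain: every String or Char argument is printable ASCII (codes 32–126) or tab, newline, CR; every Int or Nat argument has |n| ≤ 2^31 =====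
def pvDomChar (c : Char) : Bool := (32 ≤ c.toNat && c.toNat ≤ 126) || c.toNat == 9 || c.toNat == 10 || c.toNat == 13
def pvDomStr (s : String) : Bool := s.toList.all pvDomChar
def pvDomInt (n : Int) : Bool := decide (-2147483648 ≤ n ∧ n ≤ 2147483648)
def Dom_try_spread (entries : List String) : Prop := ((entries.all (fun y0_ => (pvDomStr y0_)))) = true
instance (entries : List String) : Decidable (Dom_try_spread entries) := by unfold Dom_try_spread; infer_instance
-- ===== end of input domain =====

-- B replaces A's linear fold with a growing string accumulator by a recursion on groups
-- (slice off one segment at a time at the next separator, then render each) — an alternative decomposition, same cost.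

-- ===== PORT A =====
def meal_separators : List String := ["arroz", "sopa", "espaguete", "macarrão", "canja", "lasanha"]

def starts_with_any (s : String) (candidates : List String) : Bool :=
  candidates.any (fun c => PySem.Str.startswith (PySem.Str.lower (PySem.Str.strip s)) c)

def try_spread (entries : List String) : List String :=
  let st := entries.foldl
    (fun (st : List String × String) s =>
      if starts_with_any s meal_separators then
        ((if 0 < PySem.Str.len st.2 then st.1 ++ [st.2] else st.1), s ++ " ")
      else
        (st.1, st.2 ++ (s ++ " ")))
    ([], "")
  if 0 < PySem.Str.len st.2 then st.1 ++ [st.2] else st.1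

-- ===== PORT B =====
-- Source B's inner while loop computes exactly the run of non-separator entries after
-- the head: tail[:n] = takeWhile, tail[n:] = dropWhile for the same predicate.
def split_at_seps (rest : List String) : List (List String) :=
  match rest with
  | [] => []
  | x :: tail =>
      (x :: tail.takeWhile (fun e => !starts_with_any e meal_separators))
        :: split_at_seps (tail.dropWhile (fun e => !starts_with_any e meal_separators))
  termination_by rest.length
  decreasing_by
    simp only [List.length_cons]
    exact Nat.lt_succ_of_le (List.length_dropWhile_le _ _)

def try_spread_alt (entries : List String) : List String :=
  (split_at_seps entries).map (fun seg => PySem.Str.join "" (seg.map (fun e => e ++ " ")))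

-- ===== PRECONDITION & SPEC =====
def Spec_try_spread (entries : List String) (out : List String) : Prop := out = try_spread_alt entries
instance (entries : List String) (out : List String) : Decidable (Spec_try_spread entries out) := by unfold Spec_try_spread; infer_instance

-- ===== CLAIM (what is proved, stated in full; the proofs are below) =====
def Claim_equal_try_spread : Prop := ∀ (entries : List String), Dom_try_spread entries → Spec_try_spread entries (try_spread entries)

-- ===== LEMMAS AND PROOFS =====

-- render of one segment, B's join body
def pvRen (seg : List String) : String := PySem.Str.join "" (seg.map (fun e => e ++ " "))

theorem pvRen_nil : pvRen [] = "" := rfl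

theorem joinNil_eq_flatten (l : List (List Char)) :
    PySem.Chars.join [] l = l.flatten := by
  induction l with
  | nil => simp [PySem.Chars.join_nil]
  | cons p rest ih =>
    cases rest with
    | nil => simp [PySem.Chars.join_singleton]
    | cons q rs =>
      rw [PySem.Chars.join_cons_cons, ih]
      simp

theorem toList_pvRen (seg : List String) :
    (pvRen seg).toList = (seg.map (fun e => e.toList ++ [' '])).flatten := by
  simp [pvRen, PySem.Str.toList_join, joinNil_eq_flatten, Function.comp_def, String.toList_append]

theorem pvRen_append (seg : List String) (s : String) :
    pvRen (seg ++ [s]) = pvRen seg ++ (s ++ " ") := by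
  apply String.toList_inj.mp
  simp [toList_pvRen]

theorem pvRen_singleton (s : String) : pvRen [s] = s ++ " " := by
  apply String.toList_inj.mp
  simp [toList_pvRen]

theorem pvRen_eq_empty_iff (seg : List String) : pvRen seg = "" ↔ seg = [] := by
  constructor
  · intro h
    cases seg with
    | nil => rfl
    | cons x rest =>
      exfalso
      have := congrArg String.toList h
      simp [toList_pvRen] at this
  · rintro rfl; rfl

theorem len_pvRen_pos_iff (seg : List String) : (0 < PySem.Str.len (pvRen seg)) ↔ seg ≠ [] := by
  cases seg with
  | nil => simp [pvRen_nil, PySem.Str.len_eq]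
  | cons x xs =>
    simp only [PySem.Str.len_eq, toList_pvRen, List.map_cons, List.flatten_cons, ne_eq,
      List.cons_ne_nil, not_false_iff, iff_true, List.length_append, List.length_singleton]
    push_cast
    omega

-- A's fold over a pending segment `cur` and the remaining entries, expressed as a
-- segmentation; the bridge between A's fold and B's recursion
def segWith : List String → List String → List (List String)
  | cur, [] => if cur = [] then [] else [cur]
  | cur, x :: xs =>
      if starts_with_any x meal_separators then
        (if cur = [] then [] else [cur]) ++ segWith [x] xs
      else
        segWith (cur ++ [x]) xs

theorem segWith_ne_nil (xs : List String) : ∀ cur, cur ≠ [] →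
    segWith cur xs = (cur ++ xs.takeWhile (fun e => !starts_with_any e meal_separators))
      :: split_at_seps (xs.dropWhile (fun e => !starts_with_any e meal_separators)) := by
  induction xs with
  | nil => intro cur h; simp [segWith, h, split_at_seps]
  | cons x xs ih =>
    intro cur h
    by_cases hs : starts_with_any x meal_separators
    · have h2 := ih [x] (by simp)
      simp [segWith, hs, h, split_at_seps, h2]
    · have h2 := ih (cur ++ [x]) (by simp)
      simp [segWith, hs, h2]

theorem segWith_nil_eq (xs : List String) : segWith [] xs = split_at_seps xs := by
  cases xs with
  | nil => simp [segWith, split_at_seps]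
  | cons x xs =>
    have h2 := segWith_ne_nil xs [x] (by simp)
    by_cases hs : starts_with_any x meal_separators <;>
      simp [segWith, hs, split_at_seps, h2]

theorem main_inv (xs : List String) : ∀ (acc : List String) (cur : List String),
    (let st := xs.foldl
      (fun (st : List String × String) s =>
        if starts_with_any s meal_separators then
          ((if 0 < PySem.Str.len st.2 then st.1 ++ [st.2] else st.1), s ++ " ")
        else
          (st.1, st.2 ++ (s ++ " ")))
      (acc, pvRen cur)
     if 0 < PySem.Str.len st.2 then st.1 ++ [st.2] else st.1)
    = acc ++ (segWith cur xs).map pvRen := by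
  induction xs with
  | nil =>
    intro acc cur
    by_cases h : cur = [] <;>
      simp [segWith, h, pvRen_nil, pvRen_eq_empty_iff]
  | cons x xs ih =>
    intro acc cur
    simp only [List.foldl_cons]
    by_cases hs : starts_with_any x meal_separators
    · by_cases h : cur = []
      · subst h
        simpa [hs, segWith, len_pvRen_pos_iff, pvRen_singleton] using
          ih acc [x]
      · have h2 := ih (acc ++ [pvRen cur]) [x]
        rw [pvRen_singleton] at h2
        simp only [hs, if_pos, len_pvRen_pos_iff, h, ne_eq, not_false_iff]
        rw [h2]
        simp [segWith, hs, h]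
    · have := ih acc (cur ++ [x])
      rw [pvRen_append] at this
      simp only [hs, Bool.false_eq_true, if_false]
      rw [this]
      simp [segWith, hs]

-- ===== VERDICT (by name: the statement is the Claim_ definition above) =====
theorem try_spread_spec : Claim_equal_try_spread := by
  intro entries _
  unfold Spec_try_spread try_spread try_spread_alt
  have := main_inv entries [] []
  rw [pvRen_nil] at this
  rw [this, segWith_nil_eq]
  rfl
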